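-- pv_equiv track=rewrite | github.com/allanlzee/Python-ICS | Cryptography/Encrypt.py | char_filter
-- ===== SOURCE A (Python) =====
-- def char_filter(message: str) -> str:
--     """Filters out all non-letter characters from message, which is a string
--     with letters that have all been capitalized.
--
--     >>> char_filter("IIIHDHSN&(#^@*")
--     IIIHD HSN
--
--     """
--     message = message.upper()
--
--     filtered_chars = []
--
--     filtered_str = ""
--
--     for i in range(len(message)):
--         # Append letters to filtered string.
--         if "A" <= message[i] <= "Z":
--             filtered_chars.append(message[i])
--
--     for i in range(len(filtered_chars)):
--         if i % 5 == 0 and i != 0: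
--             filtered_str += " "
--
--         filtered_str += filtered_chars[i]
--
--     return filtered_str
-- ===== SOURCE B (Python) =====
-- def char_filter(message: str) -> str:
--     """Keep only letters of message.upper(), grouped into blocks of 5
--     separated by single spaces."""
--     letters = ''.join(c for c in message.upper() if 'A' <= c <= 'Z')
--     chunks = []
--     while letters:
--         chunks.append(letters[:5])
--         letters = letters[5:]
--     return ' '.join(chunks)
-- ===== Notes on version B (the rewrite author's own statement) =====
-- stated objective: simpler
-- what changed: Replaces the index-range loop with a modulo-5 counter deciding where to insert spaces by building the filtered string once and then slicing it into 5-character chunks joined with single spaces.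
import Mathlib
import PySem

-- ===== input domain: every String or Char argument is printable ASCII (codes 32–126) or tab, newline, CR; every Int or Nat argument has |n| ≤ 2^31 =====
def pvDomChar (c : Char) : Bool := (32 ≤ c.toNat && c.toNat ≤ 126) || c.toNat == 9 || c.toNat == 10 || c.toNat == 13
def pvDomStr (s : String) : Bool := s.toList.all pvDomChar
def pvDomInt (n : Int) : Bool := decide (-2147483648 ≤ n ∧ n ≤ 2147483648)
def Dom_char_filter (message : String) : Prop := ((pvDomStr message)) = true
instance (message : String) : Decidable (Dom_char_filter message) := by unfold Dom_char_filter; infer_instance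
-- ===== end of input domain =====

-- B builds the filtered letter string once and slices it into 5-char chunks joined with ' ',
-- instead of A's modulo-5 counter loop; simpler decomposition, same behaviour.

-- ===== PORT A =====
def char_filter (message : String) : String :=
  let ml : List Char := (PySem.Str.upper message).toList
  let filtered_chars : List Char :=
    (PySem.List.pyRange 0 (PySem.List.len ml)).foldl
      (fun acc i =>
        if 'A' ≤ PySem.List.pyGetD ml i ' ' ∧ PySem.List.pyGetD ml i ' ' ≤ 'Z'
        then acc ++ [PySem.List.pyGetD ml i ' '] else acc) []
  let filtered_str : List Char :=
    (PySem.List.pyRange 0 (PySem.List.len filtered_chars)).foldl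
      (fun s i =>
        (if PySem.Int.mod i 5 = 0 ∧ i ≠ 0 then s ++ [' '] else s)
          ++ [PySem.List.pyGetD filtered_chars i ' '])
      []
  String.ofList filtered_str

-- ===== PORT B =====
-- the while-loop of Source B: slice off letters[:5], continue with letters[5:]
def pvChunks (l : List Char) : List (List Char) :=
  if l = [] then []
  else PySem.List.slice l none (some 5) :: pvChunks (PySem.List.slice l (some 5) none)
termination_by l.length
decreasing_by
  rw [PySem.List.slice_from l (a := 5) (by norm_num)]
  simp only [List.length_drop]
  rename_i h
  have : l.length ≠ 0 := fun hn => h (List.eq_nil_of_length_eq_zero hn)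
  omega

def char_filter_alt (message : String) : String :=
  let letters : List Char :=
    (PySem.Str.upper message).toList.filter (fun c => decide ('A' ≤ c ∧ c ≤ 'Z'))
  String.ofList (PySem.Chars.join [' '] (pvChunks letters))

-- ===== PRECONDITION & SPEC =====
def Spec_char_filter (message : String) (out : String) : Prop := out = char_filter_alt message
instance (message : String) (out : String) : Decidable (Spec_char_filter message out) := by unfold Spec_char_filter; infer_instance

-- ===== CLAIM (what is proved, stated in full; the proofs are below) =====
def Claim_equal_char_filter : Prop := ∀ (message : String), Dom_char_filter message → Spec_char_filter message (char_filter message)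

-- ===== LEMMAS AND PROOFS =====

-- the per-index emission of A's second loop, on Nat indices
def pvEmit (l : List Char) (k : Nat) : List Char :=
  (if k % 5 = 0 ∧ k ≠ 0 then [' '] else []) ++ [l.getD k ' ']

-- likewise but with a space also at index 0 (what index j of A's loop looks like after shifting by 5)
def pvEmitSp (l : List Char) (k : Nat) : List Char :=
  (if k % 5 = 0 then [' '] else []) ++ [l.getD k ' ']

theorem pvChunks_eq (l : List Char) :
    pvChunks l = if l = [] then [] else l.take 5 :: pvChunks (l.drop 5) := by
  rw [pvChunks.eq_def]
  split_ifs with h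
  · rfl
  · rw [PySem.List.slice_to l (b := 5) (by norm_num), PySem.List.slice_from l (a := 5) (by norm_num)]
    simp

theorem pvFoldl_emit (l : List Char) (idxs : List Nat) (acc : List Char) :
    idxs.foldl
      (fun s k => (if (k : Nat) % 5 = 0 ∧ k ≠ 0 then s ++ [' '] else s) ++ [l.getD k ' '])
      acc = acc ++ idxs.flatMap (pvEmit l) := by
  induction idxs generalizing acc with
  | nil => simp
  | cons k ks ih =>
      simp only [List.foldl_cons, List.flatMap_cons, ih, pvEmit]
      split_ifs <;> simp

theorem pvEmitSp_range (l : List Char) (h : l ≠ []) :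
    (List.range l.length).flatMap (pvEmitSp l) =
      ' ' :: (List.range l.length).flatMap (pvEmit l) := by
  obtain ⟨n, hn⟩ : ∃ n, l.length = n + 1 := by
    cases l with
    | nil => exact absurd rfl h
    | cons a as => exact ⟨as.length, rfl⟩
  rw [hn, List.range_succ_eq_map]
  have hcongr : ∀ k, pvEmitSp l (Nat.succ k) = pvEmit l (Nat.succ k) := by
    intro k
    simp [pvEmitSp, pvEmit]
  simp only [List.flatMap_cons, List.flatMap_map]
  rw [List.flatMap_congr (fun k _ => hcongr k)]
  simp [pvEmitSp, pvEmit]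

theorem pvFlatMap_chunks (l : List Char) :
    (List.range l.length).flatMap (pvEmit l) = PySem.Chars.join [' '] (pvChunks l) := by
  by_cases h : l = []
  · subst h; simp [pvChunks_eq, PySem.Chars.join_nil]
  · rw [pvChunks_eq, if_neg h]
    by_cases h5 : l.length ≤ 5
    · -- one final chunk: no index reaches a space position
      have hd : l.drop 5 = [] := List.drop_eq_nil_of_le h5
      rw [hd, pvChunks_eq, if_pos rfl, PySem.Chars.join_singleton,
          List.take_of_length_le h5]
      have : ∀ k ∈ List.range l.length, pvEmit l k = [l.getD k ' '] := by
        intro k hk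
        rw [List.mem_range] at hk
        have hk5 : k < 5 := lt_of_lt_of_le hk h5
        have : ¬ (k % 5 = 0 ∧ k ≠ 0) := by omega
        simp [pvEmit, this]
      rw [List.flatMap_congr (fun k hk => this k hk)]
      clear this h5 hd h
      induction l with
      | nil => simp
      | cons a as ih =>
          rw [List.length_cons, List.range_succ_eq_map]
          simp only [List.flatMap_cons, List.flatMap_map]
          have : ∀ k, [(a :: as).getD (Nat.succ k) ' '] = [as.getD k ' '] := by
            intro k; rfl
          rw [List.flatMap_congr (fun k _ => this k)]
          simpa using ih
    · -- more than one chunk: split the index range at 5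
      rw [not_le] at h5
      have hlen5 : l.length = 5 + (l.length - 5) := by omega
      rw [hlen5, List.range_add, List.flatMap_append, List.flatMap_map]
      have hfirst : (List.range 5).flatMap (pvEmit l) = l.take 5 := by
        have hnospace : ∀ k ∈ List.range 5, pvEmit l k = [l.getD k ' '] := by
          intro k hk
          rw [List.mem_range] at hk
          have : ¬ (k % 5 = 0 ∧ k ≠ 0) := by omega
          simp [pvEmit, this]
        rw [List.flatMap_congr (fun k hk => hnospace k hk)]
        show ([0,1,2,3,4] : List Nat).flatMap (fun k => [l.getD k ' ']) = l.take 5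
        obtain ⟨a, b, c, d, e, rest, hrest⟩ :
            ∃ a b c d e rest, l = a :: b :: c :: d :: e :: rest := by
          match l, h5 with
          | a :: b :: c :: d :: e :: rest, _ => exact ⟨a, b, c, d, e, rest, rfl⟩
        subst hrest; rfl
      have hshift : ∀ j, pvEmit l (5 + j) = pvEmitSp (l.drop 5) j := by
        intro j
        have hmod : (5 + j) % 5 = j % 5 := by omega
        have hne : (5 + j) ≠ 0 := by omega
        have hget : l.getD (5 + j) ' ' = (l.drop 5).getD j ' ' := by
          simp [List.getD_eq_getElem?_getD, List.getElem?_drop]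
        simp only [pvEmit, pvEmitSp, hmod, hne, ne_eq, not_false_eq_true, and_true, hget]
      rw [List.flatMap_congr (fun j _ => hshift j)]
      have hdlen : (l.drop 5).length = l.length - 5 := List.length_drop
      have hdne : l.drop 5 ≠ [] := by
        intro hn
        have := congrArg List.length hn
        rw [hdlen] at this
        simp at this
        omega
      rw [← hdlen, pvEmitSp_range (l.drop 5) hdne, pvFlatMap_chunks (l.drop 5)]
      have hch : pvChunks (l.drop 5) ≠ [] := by
        rw [pvChunks_eq, if_neg hdne]; simp
      obtain ⟨q, rest, hq⟩ : ∃ q rest, pvChunks (l.drop 5) = q :: rest := by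
        cases hpc : pvChunks (l.drop 5) with
        | nil => exact absurd hpc hch
        | cons q rest => exact ⟨q, rest, rfl⟩
      rw [hq, PySem.Chars.join_cons_cons]
      simp [hfirst]
termination_by l.length
decreasing_by
  simp only [List.length_drop]
  have : l.length ≠ 0 := fun hn => h (List.eq_nil_of_length_eq_zero hn)
  omega

theorem pvPhase2 (l : List Char) :
    (PySem.List.pyRange 0 (PySem.List.len l)).foldl
      (fun s i =>
        (if PySem.Int.mod i 5 = 0 ∧ i ≠ 0 then s ++ [' '] else s)
          ++ [PySem.List.pyGetD l i ' '])
      [] = PySem.Chars.join [' '] (pvChunks l) := by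
  rw [PySem.List.pyRange_one, List.foldl_map]
  have hstep : ∀ (s : List Char) (k : Nat),
      (if PySem.Int.mod ((0 : Int) + (k : Int)) 5 = 0 ∧ ((0 : Int) + (k : Int)) ≠ 0
        then s ++ [' '] else s) ++ [PySem.List.pyGetD l ((0 : Int) + (k : Int)) ' ']
      = (if k % 5 = 0 ∧ k ≠ 0 then s ++ [' '] else s) ++ [l.getD k ' '] := by
    intro s k
    have h1 : (0 : Int) + (k : Int) = (k : Int) := by ring
    have h2 : PySem.Int.mod (k : Int) 5 = ((k % 5 : Nat) : Int) := by
      simp [PySem.Int.mod, Int.fmod_eq_emod]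
    have h3 : (PySem.Int.mod (k : Int) 5 = 0 ∧ (k : Int) ≠ 0) ↔ (k % 5 = 0 ∧ k ≠ 0) := by
      rw [h2]
      constructor <;> intro ⟨ha, hb⟩ <;> constructor <;> omega
    rw [h1, PySem.List.pyGetD_natCast]
    by_cases hc : k % 5 = 0 ∧ k ≠ 0
    · rw [if_pos hc, if_pos (h3.mpr hc)]
    · rw [if_neg hc, if_neg (fun hh => hc (h3.mp hh))]
  have hlen : ((PySem.List.len l : Int) - 0).toNat = l.length := by
    simp [PySem.List.len_eq]
  rw [hlen]
  have hfun :
      (fun (s : List Char) (k : Nat) =>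
        (if PySem.Int.mod ((0 : Int) + (k : Int)) 5 = 0 ∧ ((0 : Int) + (k : Int)) ≠ 0
          then s ++ [' '] else s) ++ [PySem.List.pyGetD l ((0 : Int) + (k : Int)) ' '])
      = (fun (s : List Char) (k : Nat) =>
        (if k % 5 = 0 ∧ k ≠ 0 then s ++ [' '] else s) ++ [l.getD k ' ']) := by
    funext s k
    exact hstep s k
  rw [hfun, pvFoldl_emit l (List.range l.length) [], List.nil_append]
  exact pvFlatMap_chunks l

-- ===== VERDICT (by name: the statement is the Claim_ definition above) =====
theorem char_filter_spec : Claim_equal_char_filter := by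
  intro message _
  unfold Spec_char_filter char_filter char_filter_alt
  simp only []
  rw [PySem.List.foldl_pyRange_zero_pyGetD
        ((PySem.Str.upper message).toList) ' '
        (fun acc c => if 'A' ≤ c ∧ c ≤ 'Z' then acc ++ [c] else acc) [],
      PySem.List.foldl_append_ite_eq_filter (fun c => 'A' ≤ c ∧ c ≤ 'Z')]
  simp only [List.nil_append]
  rw [pvPhase2]
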